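-- pv_equiv track=rewrite | github.com/xntur/adventofcode | day4.py | has2
-- ===== SOURCE A (Python) =====
-- def has2(i):
--     ct = 1
--     curr = i[0]
--     for x in range(1, len(i)):
--         if i[x] == curr:
--             ct += 1
--         else:
--             if ct == 2:
--                 return True
--             ct = 1
--             curr = i[x]
--     return ct == 2
-- ===== SOURCE B (Python) =====
-- def has2(i):
--     # Run-length decomposition: establish the first run from i[0] (so the
--     # empty string still raises IndexError, as in the original), then build
--     # the full list of run lengths and test for a run of exactly 2.
--     runs = [[i[0], 1]]
--     for c in i[1:]:
--         if runs[-1][0] == c: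
--             runs[-1][1] += 1
--         else:
--             runs.append([c, 1])
--     return any(n == 2 for _, n in runs)
-- ===== Notes on version B (the rewrite author's own statement) =====
-- stated objective: idiomatic
-- what changed: A threads a curr/ct state machine with an early return through an index loop; B first builds the full run-length decomposition of the string (a list of (char, count) runs) and then simply tests whether any run has count exactly 2.
import Mathlib
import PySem

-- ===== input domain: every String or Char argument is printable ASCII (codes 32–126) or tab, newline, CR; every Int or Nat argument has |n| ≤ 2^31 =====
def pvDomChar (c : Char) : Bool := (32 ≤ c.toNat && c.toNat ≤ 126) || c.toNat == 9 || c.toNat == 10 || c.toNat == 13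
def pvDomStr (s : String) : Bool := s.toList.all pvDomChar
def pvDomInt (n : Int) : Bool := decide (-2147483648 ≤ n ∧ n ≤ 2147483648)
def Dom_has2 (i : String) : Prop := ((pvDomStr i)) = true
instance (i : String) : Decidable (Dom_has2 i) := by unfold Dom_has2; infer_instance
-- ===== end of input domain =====

-- B replaces A's running curr/ct state machine (with its mid-loop early return)
-- by first building the full run-length decomposition of the string and then
-- testing whether any run has length exactly 2 (objective: idiomatic/alternative).

-- ===== PORT A =====
-- the 'for x in range(1, len(i))' loop; state: ct, curr; early 'return True' kept
def has2Loop (l : List Char) (xs : List Int) (ct : Int) (curr : Char) : Bool :=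
  match xs with
  | [] => ct == 2
  | x :: rest =>
    match PySem.List.pyGet? l x with
    | none => false  -- IndexError (unreachable: x < len l)
    | some c =>
      if c == curr then has2Loop l rest (ct + 1) curr
      else if ct == 2 then true
      else has2Loop l rest 1 c

def has2 (i : String) : Bool :=
  match PySem.Str.pyGet? i 0 with
  | none => false  -- Python raises IndexError here; excluded by Pre_has2
  | some curr => has2Loop i.toList (PySem.List.pyRange 1 (PySem.Str.len i) 1) 1 curr

-- ===== PORT B =====
-- one step of B's loop: extend the last run or start a new one
def altStep (runs : List (Char × Int)) (c : Char) : List (Char × Int) :=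
  match runs.getLast? with
  | some (c0, n) => if c0 == c then runs.dropLast ++ [(c0, n + 1)] else runs ++ [(c, 1)]
  | none => runs ++ [(c, 1)]  -- unreachable: runs starts nonempty

def has2_alt (i : String) : Bool :=
  match PySem.Str.pyGet? i 0 with
  | none => false  -- Python raises IndexError here; excluded by Pre_has2
  | some c0 =>
    ((PySem.Str.slice i (some 1) none).toList.foldl altStep [(c0, 1)]).any
      (fun p => p.2 == 2)

-- ===== PRECONDITION & SPEC =====
-- Pre_ excludes only the empty string, on which both A and B raise IndexError (i[0]).
def Pre_has2 (i : String) : Prop := i ≠ ""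
instance (i : String) : Decidable (Pre_has2 i) := by unfold Pre_has2; infer_instance
def pvWitness_has2 : String := "1122"

def Spec_has2 (i : String) (out : Bool) : Prop := out = has2_alt i
instance (i : String) (out : Bool) : Decidable (Spec_has2 i out) := by unfold Spec_has2; infer_instance

-- ===== CLAIM (what is proved, stated in full; the proofs are below) =====
def Claim_equal_has2 : Prop := ∀ (i : String), Dom_has2 i → Pre_has2 i → Spec_has2 i (has2 i)

-- ===== LEMMAS AND PROOFS =====

-- A's loop, re-expressed structurally on the remaining suffix of the list
def auxA (r : List Char) (ct : Int) (curr : Char) : Bool :=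
  match r with
  | [] => ct == 2
  | c :: rest =>
    if c == curr then auxA rest (ct + 1) curr
    else if ct == 2 then true
    else auxA rest 1 c

-- the run-length decomposition of curr^ct ++ r, front to back
def runsAux (curr : Char) (ct : Int) (r : List Char) : List (Char × Int) :=
  match r with
  | [] => [(curr, ct)]
  | c :: rest => if c == curr then runsAux curr (ct + 1) rest
                 else (curr, ct) :: runsAux c 1 rest

theorem has2Loop_eq_auxA (l : List Char) :
    ∀ (r : List Char) (k : Nat) (ct : Int) (curr : Char), l.drop k = r →
      has2Loop l (PySem.List.pyRange k l.length 1) ct curr = auxA r ct curr := by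
  intro r
  induction r with
  | nil =>
    intro k ct curr hk
    have hlen : l.length ≤ k := by
      have := congrArg List.length hk
      simp [List.length_drop] at this
      omega
    rw [PySem.List.pyRange_one_eq_nil (by exact_mod_cast hlen)]
    rfl
  | cons c rest ih =>
    intro k ct curr hk
    have hklt : k < l.length := by
      have := congrArg List.length hk
      simp [List.length_drop] at this
      omega
    have hget : l[k]? = some c := by
      have h0 : (l.drop k)[0]? = some c := by rw [hk]; rfl
      have h1 : (l.drop k)[0]? = l[k + 0]? := List.getElem?_drop
      simp only [Nat.add_zero] at h1
      rw [← h1, h0]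
    rw [PySem.List.pyRange_one_cons (a := (k : Int)) (b := (l.length : Int))
      (by exact_mod_cast hklt)]
    have hpy : PySem.List.pyGet? l (k : Int) = some c := by
      rw [PySem.List.pyGet?_natCast, hget]
    have hdrop : l.drop (k + 1) = rest := by
      have h1 : l.drop (k + 1) = (l.drop k).drop 1 := by
        rw [List.drop_drop]
      rw [h1, hk]; rfl
    have hk1 : ((k : Int) + 1) = ((k + 1 : Nat) : Int) := by push_cast; ring
    simp only [has2Loop, hpy, auxA, hk1]
    by_cases hc : c == curr
    · simp only [hc, if_true]
      exact ih (k + 1) (ct + 1) curr hdrop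
    · simp only [hc, Bool.false_eq_true, if_false]
      by_cases h2 : ct == 2
      · simp [h2]
      · simp only [h2, Bool.false_eq_true, if_false]
        exact ih (k + 1) 1 c hdrop

theorem auxA_eq_runsAux (r : List Char) :
    ∀ (ct : Int) (curr : Char),
      auxA r ct curr = (runsAux curr ct r).any (fun p => p.2 == 2) := by
  induction r with
  | nil => intro ct curr; simp [auxA, runsAux]
  | cons c rest ih =>
    intro ct curr
    by_cases hc : c == curr
    · simp [auxA, runsAux, hc, ih]
    · by_cases h2 : ct == 2
      · simp [auxA, runsAux, hc, h2]
      · simp [auxA, runsAux, hc, h2, ih]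

theorem foldl_altStep (r : List Char) :
    ∀ (P : List (Char × Int)) (curr : Char) (ct : Int),
      List.foldl altStep (P ++ [(curr, ct)]) r = P ++ runsAux curr ct r := by
  induction r with
  | nil => intro P curr ct; simp [runsAux]
  | cons c rest ih =>
    intro P curr ct
    have hstep : altStep (P ++ [(curr, ct)]) c =
        if curr == c then P ++ [(curr, ct + 1)] else (P ++ [(curr, ct)]) ++ [(c, 1)] := by
      simp [altStep]
    by_cases hc : curr == c
    · have hc' : (c == curr) = true := by simpa [BEq.comm] using hc
      rw [List.foldl_cons, hstep, if_pos hc, ih P curr (ct + 1)]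
      simp [runsAux, hc']
    · have hc' : ¬ (c == curr) = true := by
        intro h; exact hc (by simpa [BEq.comm] using h)
      rw [List.foldl_cons, hstep, if_neg hc, ih (P ++ [(curr, ct)]) c 1]
      simp [runsAux, hc']

-- ===== VERDICT (by name: the statement is the Claim_ definition above) =====
theorem has2_spec : Claim_equal_has2 := by
  intro i _ hpre
  have hne : i.toList ≠ [] := by
    intro h
    exact hpre (String.ext (by simpa using h))
  obtain ⟨c0, t, ht⟩ : ∃ c t, i.toList = c :: t := by
    cases h : i.toList with
    | nil => exact absurd h hne
    | cons c t => exact ⟨c, t, rfl⟩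
  have hget0 : PySem.Str.pyGet? i 0 = some c0 := by
    simp [ht]
  have hlen : PySem.Str.len i = (i.toList.length : Int) := by simp
  have htail : (PySem.Str.slice i (some 1) none).toList = t := by
    simp [PySem.List.slice_from_one, ht]
  have hc1 : ((1 : Nat) : Int) = (1 : Int) := by norm_num
  have hA : has2 i = auxA t 1 c0 := by
    simp only [has2, hget0, hlen]
    rw [← hc1]
    exact has2Loop_eq_auxA i.toList t 1 1 c0 (by simp [ht])
  have hB : has2_alt i = (runsAux c0 1 t).any (fun p => p.2 == 2) := by
    simp only [has2_alt, hget0, htail]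
    have := foldl_altStep t ([] : List (Char × Int)) c0 1
    simp only [List.nil_append] at this
    rw [this]
  unfold Spec_has2
  rw [hA, hB, auxA_eq_runsAux]
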